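-- pv_equiv track=rewrite | github.com/hai-dee/thesis-code | TheAgent.py | choose_best_score_and_bindings
-- ===== SOURCE A (Python) =====
-- def choose_best_score_and_bindings(possible_bindings_with_scores):
--     best_score = None
--     best_bindings = None
--     for bindings, score in possible_bindings_with_scores:
--         if best_score == None or score > best_score:
--             best_score = score
--             best_bindings = bindings
--         elif score == best_score:
--             if len(bindings) < len(best_bindings):
--                 best_score = score
--                 best_bindings = bindings
--     return (best_bindings, best_score)
-- ===== SOURCE B (Python) =====
-- def choose_best_score_and_bindings(possible_bindings_with_scores):
--     ranked = sorted(possible_bindings_with_scores,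
--                     key=lambda bs: (-bs[1], len(bs[0])))
--     if not ranked:
--         return (None, None)
--     best_bindings, best_score = ranked[0]
--     return (best_bindings, best_score)
-- ===== Notes on version B (the rewrite author's own statement) =====
-- stated objective: alternative
-- what changed: Replaced the hand-written running-argmax loop with a stable sort by the key (-score, len(bindings)) followed by taking the first element; stability preserves first-occurrence tie-breaking.
import Mathlib
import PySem

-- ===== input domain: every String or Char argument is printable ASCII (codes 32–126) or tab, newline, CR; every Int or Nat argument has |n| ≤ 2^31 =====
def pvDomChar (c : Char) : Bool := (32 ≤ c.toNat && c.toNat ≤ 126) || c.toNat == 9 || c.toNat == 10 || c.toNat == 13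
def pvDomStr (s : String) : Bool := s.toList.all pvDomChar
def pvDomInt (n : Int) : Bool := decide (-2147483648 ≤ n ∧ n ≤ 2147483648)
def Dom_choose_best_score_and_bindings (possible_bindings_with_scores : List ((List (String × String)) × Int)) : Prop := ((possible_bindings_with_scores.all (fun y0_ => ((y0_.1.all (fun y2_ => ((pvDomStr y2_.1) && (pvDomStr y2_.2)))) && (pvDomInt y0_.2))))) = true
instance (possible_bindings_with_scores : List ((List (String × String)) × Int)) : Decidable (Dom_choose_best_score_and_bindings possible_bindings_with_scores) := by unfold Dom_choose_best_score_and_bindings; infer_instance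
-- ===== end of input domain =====

-- B replaces A's running-argmax loop by a stable sort on the key (-score, len(bindings)) and takes the first element; same return value, proved equal.


-- ===== PORT A =====
-- one step of A's for-loop body over the state (best_bindings, best_score)
def pvStepA (st : Option (List (String × String)) × Option Int)
    (bs : (List (String × String)) × Int) :
    Option (List (String × String)) × Option Int :=
  let bindings := bs.1
  let score := bs.2
  match st.2 with
  | none => (some bindings, some score)                    -- best_score == None
  | some best_score =>
    if score > best_score then (some bindings, some score)
    else if score == best_score then
      match st.1 with
      | some best_bindings =>
        if bindings.length < best_bindings.length then (some bindings, some score) else st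
      | none => st                                          -- unreachable in A (best_bindings set with best_score)
    else st

def choose_best_score_and_bindings (possible_bindings_with_scores : List ((List (String × String)) × Int)) : (Option (List (String × String))) × Option Int :=
  possible_bindings_with_scores.foldl pvStepA (none, none)

-- ===== PORT B =====
def choose_best_score_and_bindings_alt (possible_bindings_with_scores : List ((List (String × String)) × Int)) : (Option (List (String × String))) × Option Int :=
  let ranked := PySem.List.sorted2 possible_bindings_with_scores
    (fun bs => -bs.2) (fun bs => (bs.1.length : Int))
  match ranked with
  | [] => (none, none)
  | (best_bindings, best_score) :: _ => (some best_bindings, some best_score)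

-- ===== PRECONDITION & SPEC =====
def Spec_choose_best_score_and_bindings (possible_bindings_with_scores : List ((List (String × String)) × Int)) (out : (Option (List (String × String))) × Option Int) : Prop := out = choose_best_score_and_bindings_alt possible_bindings_with_scores
instance (possible_bindings_with_scores : List ((List (String × String)) × Int)) (out : (Option (List (String × String))) × Option Int) : Decidable (Spec_choose_best_score_and_bindings possible_bindings_with_scores out) := by unfold Spec_choose_best_score_and_bindings; infer_instance

-- ===== CLAIM (what is proved, stated in full; the proofs are below) =====
def Claim_equal_choose_best_score_and_bindings : Prop := ∀ (possible_bindings_with_scores : List ((List (String × String)) × Int)), Dom_choose_best_score_and_bindings possible_bindings_with_scores → Spec_choose_best_score_and_bindings possible_bindings_with_scores (choose_best_score_and_bindings possible_bindings_with_scores)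

-- ===== LEMMAS AND PROOFS =====

-- the lexicographic "strictly better" test sorted2 uses with B's keys
def pvLt (a b : (List (String × String)) × Int) : Bool :=
  decide (-a.2 < -b.2) || (!decide (-b.2 < -a.2) && decide ((a.1.length : Int) < (b.1.length : Int)))

-- the A-state represented by the current head of B's sorted accumulator
def pvStateOf (h : Option ((List (String × String)) × Int)) :
    Option (List (String × String)) × Option Int :=
  match h with
  | none => (none, none)
  | some e => (some e.1, some e.2)

lemma pvHead_insertBy (x : (List (String × String)) × Int) (acc : List ((List (String × String)) × Int)) :
    (PySem.List.insertBy pvLt x acc).head? =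
      match acc with
      | [] => some x
      | y :: _ => if pvLt x y then some x else some y := by
  cases acc with
  | nil => rfl
  | cons y ys => simp only [PySem.List.insertBy]; split <;> simp_all

lemma pvStepA_head (x : (List (String × String)) × Int) (acc : List ((List (String × String)) × Int)) :
    pvStepA (pvStateOf acc.head?) x = pvStateOf ((PySem.List.insertBy pvLt x acc).head?) := by
  rw [pvHead_insertBy]
  cases acc with
  | nil => rfl
  | cons y ys =>
    simp only [List.head?_cons, pvStateOf, pvStepA, pvLt]
    rcases lt_trichotomy x.2 y.2 with h | h | h
    · have h1 : ¬ (x.2 > y.2) := by omega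
      have h2 : ¬ (x.2 == y.2) := by simp; omega
      simp [h1, h2, show ¬ (-x.2 < -y.2) by omega, show (-y.2 < -x.2) by omega]
    · by_cases hl : x.1.length < y.1.length
      · simp [hl, h]
      · simp [hl, h]
    · simp [show x.2 > y.2 by omega, show (-x.2 < -y.2) by omega]

lemma pvFold_head (l : List ((List (String × String)) × Int)) :
    ∀ acc : List ((List (String × String)) × Int),
      l.foldl pvStepA (pvStateOf acc.head?) =
        pvStateOf ((l.foldl (fun acc x => PySem.List.insertBy pvLt x acc) acc).head?) := by
  induction l with
  | nil => intro acc; rfl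
  | cons x l ih =>
    intro acc
    simp only [List.foldl_cons]
    rw [pvStepA_head, ih (PySem.List.insertBy pvLt x acc)]

-- ===== VERDICT (by name: the statement is the Claim_ definition above) =====
theorem choose_best_score_and_bindings_spec : Claim_equal_choose_best_score_and_bindings := by
  intro l _
  show l.foldl pvStepA (none, none) = choose_best_score_and_bindings_alt l
  have h := pvFold_head l []
  simp only [List.head?_nil] at h
  rw [show pvStateOf none = ((none, none) : Option (List (String × String)) × Option Int) from rfl] at h
  rw [h]
  unfold choose_best_score_and_bindings_alt
  rw [show PySem.List.sorted2 l (fun bs => -bs.2) (fun bs => (bs.1.length : Int)) =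
        l.foldl (fun acc x => PySem.List.insertBy pvLt x acc) [] from rfl]
  cases l.foldl (fun acc x => PySem.List.insertBy pvLt x acc) [] with
  | nil => rfl
  | cons e t => rfl
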